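-- pv_equiv track=rewrite | github.com/emanuellegrody/SALVEseq | extractionScripts/Python/predict_polyA.py | find_arich_regions
-- ===== SOURCE A (Python) =====
-- def find_arich_regions(sequence):
--     """
--     Identify A-rich regions using sliding window approach.
--
--     Args:
--         sequence: Complete genome sequence string
--
--     Returns:
--         List of tuples (start_pos, end_pos, length, mismatches)
--
--     Technical approach:
--     - Sliding window examines all possible substrings starting with 'A'
--     - For each starting 'A', extends window while criteria are met
--     - Stops extension when: too many mismatches (>2), non-A at end, or sequence end
--     - This approach has O(n*m) complexity where n=sequence length, m=max region length
--     - Could be optimized with dynamic programming, but this is clear and sufficient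
--       for genome-sized data
--     """
--     regions = []
--     seq_len = len(sequence)
--     i = 0
--
--     while i < seq_len:
--         # Must start with 'A'
--         if sequence[i] != 'A':
--             i += 1
--             continue
--
--         # Try to extend the region
--         mismatches = 0
--         j = i + 1
--
--         # Extend while within bounds and criteria are met
--         while j < seq_len:
--             if sequence[j] != 'A':
--                 mismatches += 1
--                 # Too many mismatches - stop extending
--                 if mismatches > 2:
--                     break
--
--             # Check if current window is valid (ends with 'A' and length >= 6)
--             if sequence[j] == 'A' and (j - i + 1) >= 6:
--                 # Valid A-rich region found
--                 start_pos = i + 1  # Convert to 1-indexed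
--                 end_pos = j + 1  # Convert to 1-indexed
--                 length = j - i + 1
--                 regions.append((start_pos, end_pos, length, mismatches))
--
--             j += 1
--
--         # Move to next position
--         # Technical note: We increment by 1 to detect overlapping regions
--         # Alternative would be i = j to skip past found regions (faster but misses overlaps)
--         i += 1
--
--     return regions
-- ===== SOURCE B (Python) =====
-- def find_arich_regions(sequence):
--     """Prefix-table reformulation: precompute non-A prefix counts and the list of
--     non-A positions; each window's hard end is a table lookup, the inner loop
--     scans a computed range with no mismatch counter or break."""
--     n = len(sequence)
--     prefix = [0] * (n + 1)   # prefix[k] = number of non-A chars in sequence[:k]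
--     nonA = []                # positions of non-A chars, in order
--     for k in range(n):
--         is_mm = 1 if sequence[k] != 'A' else 0
--         prefix[k + 1] = prefix[k] + is_mm
--         if is_mm:
--             nonA.append(k)
--     regions = []
--     for i in range(n):
--         if sequence[i] != 'A':
--             continue
--         cnt = prefix[i + 1]
--         end = nonA[cnt + 2] if cnt + 2 < len(nonA) else n
--         for j in range(i + 5, end):
--             if sequence[j] == 'A':
--                 regions.append((i + 1, j + 1, j - i + 1,
--                                 prefix[j + 1] - prefix[i + 1]))
--     return regions
-- ===== Notes on version B (the rewrite author's own statement) =====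
-- stated objective: alternative
-- what changed: Replaced A's per-window incremental mismatch counter with break by a precomputed prefix-count array plus a list of mismatch positions: each window's hard end is a single table lookup and the inner loop scans a computed index range with no counter or early exit.
import Mathlib
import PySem

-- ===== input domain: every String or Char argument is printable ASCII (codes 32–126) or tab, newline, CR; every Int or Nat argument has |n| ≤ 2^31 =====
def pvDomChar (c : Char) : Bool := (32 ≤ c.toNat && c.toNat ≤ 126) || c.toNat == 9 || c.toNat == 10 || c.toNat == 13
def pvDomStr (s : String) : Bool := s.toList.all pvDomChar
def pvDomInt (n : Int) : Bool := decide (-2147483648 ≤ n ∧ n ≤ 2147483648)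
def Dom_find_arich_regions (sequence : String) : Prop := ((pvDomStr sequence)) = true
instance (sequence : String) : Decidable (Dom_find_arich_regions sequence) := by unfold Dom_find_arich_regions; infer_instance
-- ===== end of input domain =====

-- B replaces A's incremental mismatch counter and break with precomputed prefix-count
-- and non-A-position tables; the window end is a table lookup and the inner loop runs
-- over a computed index range (objective: alternative decomposition, same cost).

-- sequence[j] (indices used by both programs are always in range, so the default is never hit)
def pvCharAt (cs : List Char) (j : Nat) : Char := cs.getD j ' '

-- ===== PORT A =====
-- inner while-loop of A: state (j, mismatches, regions); fuel bounds the iterations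
def faInner (cs : List Char) (i : Nat) :
    Nat → Nat → Nat → List (Int × Int × Int × Int) → List (Int × Int × Int × Int)
  | 0, _, _, acc => acc
  | fuel+1, j, m, acc =>
    if j < cs.length then
      let m' := if pvCharAt cs j ≠ 'A' then m + 1 else m
      if pvCharAt cs j ≠ 'A' ∧ 2 < m' then acc
      else
        faInner cs i fuel (j+1) m'
          (if pvCharAt cs j = 'A' ∧ (6:Int) ≤ (j:Int) - (i:Int) + 1 then
             acc ++ [((i:Int)+1, (j:Int)+1, (j:Int)-(i:Int)+1, (m' : Int))]
           else acc)
    else acc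

def find_arich_regions (sequence : String) : List (Int × Int × Int × Int) :=
  let cs := sequence.toList
  let n := cs.length
  (List.range n).foldl (fun acc i =>
    if pvCharAt cs i ≠ 'A' then acc
    else faInner cs i (n - i) (i+1) 0 acc) []

-- ===== PORT B =====
-- one pass building (prefix, nonA): prefix!k = #non-A in cs.take k; nonA = non-A positions
def fbTables : List Char → Nat → Nat → List Nat × List Nat
  | [], p, _ => ([p], [])
  | c :: rest, p, k =>
    let d := if c ≠ 'A' then 1 else 0
    let t := fbTables rest (p + d) (k+1)
    (p :: t.1, if c ≠ 'A' then k :: t.2 else t.2)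

def find_arich_regions_alt (sequence : String) : List (Int × Int × Int × Int) :=
  let cs := sequence.toList
  let n := cs.length
  let t := fbTables cs 0 0
  let P := t.1
  let N := t.2
  (List.range n).foldl (fun acc i =>
    if pvCharAt cs i ≠ 'A' then acc
    else
      let cnt := P.getD (i+1) 0
      let e := if cnt + 2 < N.length then N.getD (cnt + 2) 0 else n
      (List.range' (i+5) (e - (i+5))).foldl (fun acc j =>
        if pvCharAt cs j = 'A' then
          acc ++ [((i:Int)+1, (j:Int)+1, (j:Int)-(i:Int)+1,
                   ((P.getD (j+1) 0 : Nat) : Int) - ((P.getD (i+1) 0 : Nat) : Int))]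
        else acc) acc) []

-- ===== PRECONDITION & SPEC =====
def Spec_find_arich_regions (sequence : String) (out : List (Int × Int × Int × Int)) : Prop := out = find_arich_regions_alt sequence
instance (sequence : String) (out : List (Int × Int × Int × Int)) : Decidable (Spec_find_arich_regions sequence out) := by unfold Spec_find_arich_regions; infer_instance

-- ===== CLAIM (what is proved, stated in full; the proofs are below) =====
def Claim_equal_find_arich_regions : Prop := ∀ (sequence : String), Dom_find_arich_regions sequence → Spec_find_arich_regions sequence (find_arich_regions sequence)

-- ===== LEMMAS AND PROOFS =====

-- number of non-A characters among the first k characters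
def cntTo (cs : List Char) (k : Nat) : Nat := (cs.take k).countP (fun c => !(c == 'A'))

-- the tuple both programs append for window [i, j]
def tupCnt (cs : List Char) (i j : Nat) : Int × Int × Int × Int :=
  ((i:Int)+1, (j:Int)+1, (j:Int)-(i:Int)+1, ((cntTo cs (j+1) : Nat) : Int) - ((cntTo cs (i+1) : Nat) : Int))

-- position where A's inner loop stops: first e with 3 non-A chars in (i, e], else length
def endAbs (cs : List Char) (c1 : Nat) : Nat :=
  if h : ∃ e, e < cs.length ∧ c1 + 3 ≤ cntTo cs (e+1) then Nat.find h else cs.length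

lemma pvFoldlCongr {α β : Type} (l : List β) (f g : α → β → α) (a : α)
    (h : ∀ a x, x ∈ l → f a x = g a x) : l.foldl f a = l.foldl g a := by
  induction l generalizing a with
  | nil => rfl
  | cons x xs ih =>
    simp only [List.foldl_cons]
    rw [h _ _ (List.mem_cons_self)]
    exact ih _ (fun a y hy => h a y (List.mem_cons_of_mem _ hy))

lemma pvFoldlId {α β : Type} (l : List β) (f : α → β → α) (a : α)
    (h : ∀ a x, x ∈ l → f a x = a) : l.foldl f a = a := by
  induction l generalizing a with
  | nil => rfl
  | cons x xs ih =>
    simp only [List.foldl_cons]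
    rw [h _ _ (List.mem_cons_self)]
    exact ih _ (fun a y hy => h a y (List.mem_cons_of_mem _ hy))

lemma cntTo_mono (cs : List Char) {a b : Nat} (h : a ≤ b) : cntTo cs a ≤ cntTo cs b := by
  unfold cntTo
  have h1 : cs.take a = (cs.take b).take a := by rw [List.take_take, Nat.min_eq_left h]
  rw [h1]
  exact (List.take_sublist _ _).countP_le

lemma cntTo_succ (cs : List Char) {j : Nat} (h : j < cs.length) :
    cntTo cs (j+1) = cntTo cs j + (if pvCharAt cs j = 'A' then 0 else 1) := by
  have hj : cs[j]? = some cs[j] := List.getElem?_eq_getElem h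
  have hg : pvCharAt cs j = cs[j] := by simp [pvCharAt, List.getD_eq_getElem?_getD, hj]
  unfold cntTo
  rw [List.take_add_one, hj, List.countP_append, hg]
  by_cases hA : cs[j] = 'A' <;> simp [hA]

lemma endAbs_le (cs : List Char) (c1 : Nat) : endAbs cs c1 ≤ cs.length := by
  unfold endAbs
  split
  · next h => exact le_of_lt (Nat.find_spec h).1
  · exact le_rfl

lemma endAbs_eq (cs : List Char) (c1 j : Nat) (hj : j < cs.length)
    (hc : c1 + 3 ≤ cntTo cs (j+1)) (hmin : ∀ e, e < j → cntTo cs (e+1) < c1 + 3) :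
    endAbs cs c1 = j := by
  unfold endAbs
  have hex : ∃ e, e < cs.length ∧ c1 + 3 ≤ cntTo cs (e+1) := ⟨j, hj, hc⟩
  rw [dif_pos hex]
  have h1 : Nat.find hex ≤ j := Nat.find_min' hex ⟨hj, hc⟩
  have h2 : c1 + 3 ≤ cntTo cs (Nat.find hex + 1) := (Nat.find_spec hex).2
  by_contra hne
  have hlt : Nat.find hex < j := lt_of_le_of_ne h1 hne
  have := hmin _ hlt
  omega

lemma lt_endAbs (cs : List Char) (c1 j : Nat) (hj : j < cs.length)
    (hmin : ∀ e, e ≤ j → cntTo cs (e+1) < c1 + 3) : j < endAbs cs c1 := by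
  unfold endAbs
  split
  · next h =>
    by_contra hle
    have h1 : Nat.find h ≤ j := by omega
    have h2 := (Nat.find_spec h).2
    have := hmin _ h1
    omega
  · exact hj

lemma endAbs_all (cs : List Char) (c1 : Nat)
    (h : ∀ e, e < cs.length → cntTo cs (e+1) < c1 + 3) : endAbs cs c1 = cs.length := by
  unfold endAbs
  split
  · next hex =>
    have h1 := (Nat.find_spec hex).2
    have := h _ (Nat.find_spec hex).1
    omega
  · rfl

lemma fbP (cs : List Char) : ∀ (p k m : Nat), m ≤ cs.length →
    ((fbTables cs p k).1).getD m 0 = p + cntTo cs m := by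
  induction cs with
  | nil =>
    intro p k m h
    have : m = 0 := Nat.le_zero.mp h
    subst this
    simp [fbTables, cntTo]
  | cons c rest ih =>
    intro p k m h
    cases m with
    | zero => simp [fbTables, cntTo]
    | succ m' =>
      simp only [fbTables, List.getD_cons_succ]
      rw [ih _ (k+1) m' (by simpa using h)]
      have : cntTo (c :: rest) (m'+1) = (if c ≠ 'A' then 1 else 0) + cntTo rest m' := by
        unfold cntTo
        rw [List.take_succ_cons, List.countP_cons]
        by_cases hA : c = 'A' <;> simp [hA] <;> omega
      rw [this]
      omega

lemma fbNlen (cs : List Char) : ∀ (p k : Nat),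
    ((fbTables cs p k).2).length = cntTo cs cs.length := by
  induction cs with
  | nil => intro p k; simp [fbTables, cntTo]
  | cons c rest ih =>
    intro p k
    have hc : cntTo (c :: rest) (rest.length + 1) =
        (if c ≠ 'A' then 1 else 0) + cntTo rest rest.length := by
      unfold cntTo
      rw [List.take_succ_cons, List.countP_cons]
      by_cases hA : c = 'A' <;> simp [hA] <;> omega
    simp only [fbTables, List.length_cons]
    rw [hc]
    by_cases hA : c = 'A' <;> simp [hA, ih] <;> omega

lemma fbNget (cs : List Char) : ∀ (p k t : Nat), t < ((fbTables cs p k).2).length →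
    ∃ m, ((fbTables cs p k).2).getD t 0 = k + m ∧ m < cs.length ∧
      ¬(pvCharAt cs m = 'A') ∧ cntTo cs m = t := by
  induction cs with
  | nil => intro p k t h; simp [fbTables] at h
  | cons c rest ih =>
    intro p k t h
    simp only [fbTables] at h ⊢
    by_cases hA : c = 'A'
    · have hne : ¬(c ≠ 'A') := by simp [hA]
      simp only [if_neg hne] at h ⊢
      obtain ⟨m', hget, hlt, hne', hcnt⟩ := ih _ (k+1) t h
      refine ⟨m'+1, ?_, by simpa using hlt, by simpa [pvCharAt] using hne', ?_⟩
      · rw [hget]; omega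
      · unfold cntTo at hcnt ⊢
        rw [List.take_succ_cons, List.countP_cons]
        simp [hA, hcnt]
    · have hne : (c ≠ 'A') := hA
      simp only [if_pos hne] at h ⊢
      cases t with
      | zero =>
        exact ⟨0, by simp, by simp, by simpa [pvCharAt] using hA, by simp [cntTo]⟩
      | succ t' =>
        have h' : t' < ((fbTables rest (p+1) (k+1)).2).length := by simpa using h
        obtain ⟨m', hget, hlt, hne', hcnt⟩ := ih (p+1) (k+1) t' h'
        refine ⟨m'+1, ?_, by simpa using hlt, by simpa [pvCharAt] using hne', ?_⟩
        · simp only [List.getD_cons_succ]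
          rw [hget]; omega
        · unfold cntTo at hcnt ⊢
          rw [List.take_succ_cons, List.countP_cons]
          simp [hA, hcnt]

-- the step function A's inner loop is shown to fold with
def faStep (cs : List Char) (i : Nat) (a : List (Int × Int × Int × Int)) (j : Nat) :
    List (Int × Int × Int × Int) :=
  if pvCharAt cs j = 'A' ∧ i+5 ≤ j then a ++ [tupCnt cs i j] else a

lemma faInner_eq (cs : List Char) (i : Nat) :
    ∀ fuel j m acc, cs.length ≤ j + fuel → i < j → m + cntTo cs (i+1) = cntTo cs j → m ≤ 2 →
    faInner cs i fuel j m acc =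
      (List.range' j (endAbs cs (cntTo cs (i+1)) - j)).foldl (faStep cs i) acc := by
  intro fuel
  induction fuel with
  | zero =>
    intro j m acc hfuel hij hm hm2
    have hE : endAbs cs (cntTo cs (i+1)) - j = 0 := by
      have := endAbs_le cs (cntTo cs (i+1)); omega
    rw [hE]
    simp [faInner]
  | succ fuel ih =>
    intro j m acc hfuel hij hm hm2
    by_cases hjn : j < cs.length
    · by_cases hA : pvCharAt cs j = 'A'
      · -- sequence[j] == 'A'
        have hsucc : cntTo cs (j+1) = cntTo cs j := by
          rw [cntTo_succ cs hjn]; simp [hA]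
        have hjE : j < endAbs cs (cntTo cs (i+1)) := by
          apply lt_endAbs cs _ j hjn
          intro e he
          have := cntTo_mono cs (show e+1 ≤ j+1 by omega)
          omega
        have hrange : endAbs cs (cntTo cs (i+1)) - j
            = (endAbs cs (cntTo cs (i+1)) - (j+1)) + 1 := by omega
        rw [hrange, List.range'_succ, List.foldl_cons]
        have hstep : faInner cs i (fuel+1) j m acc
            = faInner cs i fuel (j+1) m
                (if (6:Int) ≤ (j:Int) - (i:Int) + 1 then
                   acc ++ [((i:Int)+1, (j:Int)+1, (j:Int)-(i:Int)+1, (m:Int))]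
                 else acc) := by
          simp [faInner, hjn, hA]
        rw [hstep, ih (j+1) m _ (by omega) (by omega) (by omega) hm2]
        congr 1
        have hguard : ((6:Int) ≤ (j:Int) - (i:Int) + 1) ↔ (i+5 ≤ j) := by omega
        have htup : ((m : Nat) : Int)
            = ((cntTo cs (j+1) : Nat) : Int) - ((cntTo cs (i+1) : Nat) : Int) := by omega
        unfold faStep tupCnt
        by_cases hg : i+5 ≤ j
        · rw [if_pos (hguard.mpr hg), if_pos ⟨hA, hg⟩, htup]
        · rw [if_neg (fun hc => hg (hguard.mp hc)), if_neg (by tauto)]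
      · -- sequence[j] != 'A'
        have hsucc : cntTo cs (j+1) = cntTo cs j + 1 := by
          rw [cntTo_succ cs hjn]; simp [hA]
        by_cases h2 : 2 ≤ m
        · -- third mismatch: break
          have hm2' : m = 2 := by omega
          subst hm2'
          have hE : endAbs cs (cntTo cs (i+1)) = j := by
            apply endAbs_eq cs _ j hjn (by omega)
            intro e he
            have := cntTo_mono cs (show e+1 ≤ j by omega)
            omega
          have hstep : faInner cs i (fuel+1) j 2 acc = acc := by
            simp [faInner, hjn, hA]
          rw [hstep, hE]
          simp
        · -- mismatch but continue
          have hjE : j < endAbs cs (cntTo cs (i+1)) := by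
            apply lt_endAbs cs _ j hjn
            intro e he
            have := cntTo_mono cs (show e+1 ≤ j+1 by omega)
            omega
          have hrange : endAbs cs (cntTo cs (i+1)) - j
              = (endAbs cs (cntTo cs (i+1)) - (j+1)) + 1 := by omega
          rw [hrange, List.range'_succ, List.foldl_cons]
          have hstep : faInner cs i (fuel+1) j m acc = faInner cs i fuel (j+1) (m+1) acc := by
            simp [faInner, hjn, hA, show ¬(2 < m+1) by omega]
          rw [hstep, ih (j+1) (m+1) _ (by omega) (by omega) (by omega) (by omega)]
          congr 1
          unfold faStep
          rw [if_neg (by tauto)]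
    · have hE : endAbs cs (cntTo cs (i+1)) - j = 0 := by
        have := endAbs_le cs (cntTo cs (i+1)); omega
      rw [hE]
      simp [faInner, hjn]

lemma foldl_shift (cs : List Char) (i e : Nat) (acc : List (Int × Int × Int × Int)) :
    (List.range' (i+1) (e - (i+1))).foldl (faStep cs i) acc
    = (List.range' (i+5) (e - (i+5))).foldl
        (fun a j => if pvCharAt cs j = 'A' then a ++ [tupCnt cs i j] else a) acc := by
  by_cases h : e ≤ i+5
  · have h5 : e - (i+5) = 0 := by omega
    rw [h5]
    simp only [List.range'_zero, List.foldl_nil]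
    apply pvFoldlId
    intro a x hx
    have hx' := List.mem_range'_1.mp hx
    unfold faStep
    rw [if_neg (by omega)]
  · have hsplit : e - (i+1) = 4 + (e - (i+5)) := by omega
    rw [hsplit, ← List.range'_append_1, List.foldl_append]
    have h4 : (List.range' (i+1) 4).foldl (faStep cs i) acc = acc := by
      apply pvFoldlId
      intro a x hx
      have hx' := List.mem_range'_1.mp hx
      unfold faStep
      rw [if_neg (by omega)]
    rw [h4]
    have h15 : i + 1 + 4 = i + 5 := by omega
    rw [h15]
    apply pvFoldlCongr
    intro a x hx
    have hx' := List.mem_range'_1.mp hx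
    unfold faStep
    by_cases hA : pvCharAt cs x = 'A'
    · rw [if_pos ⟨hA, by omega⟩, if_pos hA]
    · rw [if_neg (by tauto), if_neg hA]

lemma eB_eq (cs : List Char) (i : Nat) (hi : i < cs.length) :
    (if (fbTables cs 0 0).1.getD (i+1) 0 + 2 < ((fbTables cs 0 0).2).length
     then ((fbTables cs 0 0).2).getD ((fbTables cs 0 0).1.getD (i+1) 0 + 2) 0 else cs.length)
    = endAbs cs (cntTo cs (i+1)) := by
  have hP : (fbTables cs 0 0).1.getD (i+1) 0 = cntTo cs (i+1) := by
    rw [fbP cs 0 0 (i+1) (by omega)]; omega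
  rw [hP]
  split
  · next h =>
    obtain ⟨m, hget, hlt, hne, hcnt⟩ := fbNget cs 0 0 (cntTo cs (i+1) + 2) h
    rw [hget]
    have hm0 : (0:Nat) + m = m := by omega
    rw [hm0]
    symm
    apply endAbs_eq cs _ m hlt
    · rw [cntTo_succ cs hlt]
      simp [hne, hcnt]
    · intro e he
      have := cntTo_mono cs (show e+1 ≤ m by omega)
      omega
  · next h =>
    symm
    apply endAbs_all
    intro e he
    rw [fbNlen cs 0 0] at h
    have := cntTo_mono cs (show e+1 ≤ cs.length by omega)
    omega

-- ===== VERDICT (by name: the statement is the Claim_ definition above) =====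
theorem find_arich_regions_spec : Claim_equal_find_arich_regions := by
  intro s _hd
  unfold Spec_find_arich_regions
  simp only [find_arich_regions, find_arich_regions_alt]
  apply pvFoldlCongr
  intro acc i hi
  have hin : i < s.toList.length := List.mem_range.mp hi
  by_cases hA : pvCharAt s.toList i = 'A'
  · rw [if_neg (by simp [hA]), if_neg (by simp [hA])]
    rw [faInner_eq s.toList i (s.toList.length - i) (i+1) 0 acc (by omega) (by omega)
        (by omega) (by omega)]
    rw [foldl_shift]
    rw [eB_eq s.toList i hin]
    apply pvFoldlCongr
    intro a j hj
    have hj' := List.mem_range'_1.mp hj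
    have hjlt : j + 1 ≤ s.toList.length := by
      have h2 := endAbs_le s.toList (cntTo s.toList (i+1))
      omega
    rw [fbP s.toList 0 0 (j+1) hjlt, fbP s.toList 0 0 (i+1) (by omega)]
    unfold tupCnt
    norm_num
  · rw [if_pos hA, if_pos hA]
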